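-- pv_equiv track=rewrite | github.com/Nerdlin/nerdlin-contrib-art | scripts/contrib_word_art.py | compose_word
-- ===== SOURCE A (Python) =====
-- FONT_5x7 = {
--     "N": [
--         "10001",
--         "11001",
--         "10101",
--         "10011",
--         "10001",
--         "10001",
--         "10001",
--     ],
--     "E": [
--         "11111",
--         "10000",
--         "11110",
--         "10000",
--         "11111",
--         "00000",
--         "00000",
--     ],
--     "R": [
--         "11110",
--         "10001",
--         "11110",
--         "10100",
--         "10010",
--         "10001",
--         "00000",
--     ],
--     "D": [
--         "11110",
--         "10001",
--         "10001",
--         "10001",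
--         "11110",
--         "00000",
--         "00000",
--     ],
--     "L": [
--         "10000",
--         "10000",
--         "10000",
--         "10000",
--         "11111",
--         "00000",
--         "00000",
--     ],
--     "I": [
--         "11111",
--         "00100",
--         "00100",
--         "00100",
--         "11111",
--         "00000",
--         "00000",
--     ],
-- }
--
-- def compose_word(word: str, total_columns: int = 52, spacing: int = 1):
--     # Build pixel matrix (7 rows x total_columns)
--     rows, cols = 7, total_columns
--     canvas = [[0 for _ in range(cols)] for _ in range(rows)]
--
--     # Measure word width in columns
--     width = 0
--     letters = []
--     for ch in word.upper():
--         if ch not in FONT_5x7: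
--             continue
--         letters.append(FONT_5x7[ch])
--         width += 5
--         width += spacing
--     if letters:
--         width -= spacing  # no trailing space
--
--     start_col = max(0, (cols - width) // 2)
--     c = start_col
--     for glyph in letters:
--         for r in range(7):
--             for x in range(5):
--                 if glyph[r][x] == "1" and 0 <= c + x < cols:
--                     canvas[r][c + x] = 1
--         c += 5 + spacing
--
--     return canvas
-- ===== SOURCE B (Python) =====
-- FONT_5x7 = {
--     "N": ["10001","11001","10101","10011","10001","10001","10001"],
--     "E": ["11111","10000","11110","10000","11111","00000","00000"],
--     "R": ["11110","10001","11110","10100","10010","10001","00000"],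
--     "D": ["11110","10001","10001","10001","11110","00000","00000"],
--     "L": ["10000","10000","10000","10000","11111","00000","00000"],
--     "I": ["11111","00100","00100","00100","11111","00000","00000"],
-- }
--
-- def compose_word(word: str, total_columns: int = 52, spacing: int = 1):
--     # Gather formulation: compute each output cell directly by scanning the glyph
--     # list for a glyph whose 5-column span covers that cell and lights it.
--     glyphs = [FONT_5x7[ch] for ch in word.upper() if ch in FONT_5x7]
--     n = len(glyphs)
--     width = 5 * n + spacing * (n - 1) if glyphs else 0
--     start = max(0, (total_columns - width) // 2)
--
--     def cell(r, c):
--         for j, g in enumerate(glyphs):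
--             x = c - start - j * (5 + spacing)
--             if 0 <= x < 5 and g[r][x] == "1":
--                 return 1
--         return 0
--
--     return [[cell(r, c) for c in range(total_columns)] for r in range(7)]
-- ===== Notes on version B (the rewrite author's own statement) =====
-- stated objective: alternative
-- what changed: Replaces A's scatter algorithm (a running column cursor mutating a zeroed canvas in place, glyph by glyph, with a clip guard) by a gather formulation: each output cell is computed directly, without mutation, by scanning the glyph list for one whose 5-column span covers that cell and lights it.
import Mathlib
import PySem

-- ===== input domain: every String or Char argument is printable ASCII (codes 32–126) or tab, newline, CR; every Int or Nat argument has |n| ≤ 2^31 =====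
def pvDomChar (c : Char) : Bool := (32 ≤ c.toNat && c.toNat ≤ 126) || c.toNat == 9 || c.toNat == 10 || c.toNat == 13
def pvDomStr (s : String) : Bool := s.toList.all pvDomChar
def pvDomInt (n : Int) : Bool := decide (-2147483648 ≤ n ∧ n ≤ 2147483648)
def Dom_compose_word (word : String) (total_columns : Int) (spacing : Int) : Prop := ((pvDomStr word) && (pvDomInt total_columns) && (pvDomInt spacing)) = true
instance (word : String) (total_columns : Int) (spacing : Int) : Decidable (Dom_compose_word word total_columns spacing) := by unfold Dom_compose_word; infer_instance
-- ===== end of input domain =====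

-- B replaces A's scatter loop (cursor + in-place plotting) by a mutation-free gather:
-- every output cell is computed directly by scanning the glyph list (objective: alternative).

-- ===== PORT A =====
-- the module-level font table (Python dict with 1-char string keys)
def FONT_5x7 : PySem.Dict String (List String) :=
  PySem.Dict.ofList [
    ("N", ["10001","11001","10101","10011","10001","10001","10001"]),
    ("E", ["11111","10000","11110","10000","11111","00000","00000"]),
    ("R", ["11110","10001","11110","10100","10010","10001","00000"]),
    ("D", ["11110","10001","10001","10001","11110","00000","00000"]),
    ("L", ["10000","10000","10000","10000","11111","00000","00000"]),
    ("I", ["11111","00100","00100","00100","11111","00000","00000"])]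

-- literal port of A: zeroed canvas, measuring loop, then the direct plot loop with a running cursor.
-- glyph[r] / glyph[r][x] are indexed with getD / pyGet?: exact here, since r < 7, x < 5 and every
-- font glyph has 7 rows of 5 characters, so the Python indexing never raises.
def compose_word (word : String) (total_columns : Int) (spacing : Int) : List (List Int) :=
  let cols : Int := total_columns
  let canvas : List (List Int) :=
    (List.range 7).map (fun _ => (PySem.List.pyRange 0 cols 1).map (fun _ => (0 : Int)))
  let st : Int × List (List String) :=
    (PySem.Str.upper word).toList.foldl
      (fun (st : Int × List (List String)) ch =>
        if FONT_5x7.contains (String.singleton ch) then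
          (st.1 + 5 + spacing, st.2 ++ [FONT_5x7.getD (String.singleton ch) []])
        else st) (0, [])
  let letters : List (List String) := st.2
  let width : Int := if letters = [] then st.1 else st.1 - spacing
  let start_col : Int := max 0 (PySem.Int.floordiv (cols - width) 2)
  let res : List (List Int) × Int :=
    letters.foldl
      (fun (acc : List (List Int) × Int) glyph =>
        ((List.range 7).foldl (fun cv (r : Nat) =>
          (List.range 5).foldl (fun cv (x : Nat) =>
            if PySem.Str.pyGet? (glyph.getD r "") (x : Int) = some '1' ∧
                0 ≤ acc.2 + (x : Int) ∧ acc.2 + (x : Int) < cols then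
              cv.set r ((cv.getD r []).set (acc.2 + (x : Int)).toNat 1)
            else cv) cv) acc.1,
         acc.2 + 5 + spacing))
      (canvas, start_col)
  res.1

-- ===== PORT B =====
-- literal port of B (Source B): collect the glyphs, closed-form width, then a mutation-free gather:
-- cell (r, c) scans the enumerated glyph list for the first glyph covering column c with a lit
-- pixel (Python's early-return loop = List.any).  Same indexing remark as in port A.
def compose_word_alt (word : String) (total_columns : Int) (spacing : Int) : List (List Int) :=
  let glyphs : List (List String) :=
    (PySem.Str.upper word).toList.filterMap (fun ch => FONT_5x7.get? (String.singleton ch))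
  let n : Int := glyphs.length
  let width : Int := if glyphs = [] then 0 else 5 * n + spacing * (n - 1)
  let start : Int := max 0 (PySem.Int.floordiv (total_columns - width) 2)
  (List.range 7).map (fun (r : Nat) =>
    (PySem.List.pyRange 0 total_columns 1).map (fun c =>
      if (PySem.List.enumerate glyphs 0).any (fun jg =>
            let x : Int := c - start - jg.1 * (5 + spacing)
            decide (0 ≤ x ∧ x < 5 ∧ PySem.Str.pyGet? (jg.2.getD r "") x = some '1'))
      then (1 : Int) else 0))

-- ===== PRECONDITION & SPEC =====
def Spec_compose_word (word : String) (total_columns : Int) (spacing : Int) (out : List (List Int)) : Prop := out = compose_word_alt word total_columns spacing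
instance (word : String) (total_columns : Int) (spacing : Int) (out : List (List Int)) : Decidable (Spec_compose_word word total_columns spacing out) := by unfold Spec_compose_word; infer_instance

-- ===== CLAIM (what is proved, stated in full; the proofs are below) =====
def Claim_equal_compose_word : Prop := ∀ (word : String) (total_columns : Int) (spacing : Int), Dom_compose_word word total_columns spacing → Spec_compose_word word total_columns spacing (compose_word word total_columns spacing)

-- ===== LEMMAS AND PROOFS =====

-- normal form for a 7-row canvas with N columns: entry (r,k) is 1 exactly when P r k
def pvCanvasOf (N : Nat) (P : Nat → Nat → Bool) : List (List Int) :=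
  (List.range 7).map (fun r => (List.range N).map (fun k => if P r k then (1 : Int) else 0))

def pvSetCell (cv : List (List Int)) (r0 i0 : Nat) : List (List Int) :=
  cv.set r0 ((cv.getD r0 []).set i0 1)

lemma pvSet_map_range {β : Type} (h : Nat → β) (N i : Nat) (v : β) :
    ((List.range N).map h).set i v = (List.range N).map (fun k => if k = i then v else h k) := by
  apply List.ext_getElem
  · simp
  · intro n h1 h2
    simp only [List.getElem_set, List.getElem_map, List.getElem_range]
    rcases eq_or_ne i n with hin | hin
    · simp [hin]
    · simp [hin, Ne.symm hin]

lemma pvCanvasOf_congr (N : Nat) (P Q : Nat → Nat → Bool)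
    (h : ∀ r, r < 7 → ∀ k, k < N → P r k = Q r k) : pvCanvasOf N P = pvCanvasOf N Q := by
  unfold pvCanvasOf
  apply List.map_congr_left
  intro r hr
  apply List.map_congr_left
  intro k hk
  rw [h r (List.mem_range.mp hr) k (List.mem_range.mp hk)]

lemma pvSetCell_canvasOf (N : Nat) (P : Nat → Nat → Bool) (r0 i0 : Nat) :
    pvSetCell (pvCanvasOf N P) r0 i0
      = pvCanvasOf N (fun r k => P r k || (decide (r0 = r) && decide (i0 = k))) := by
  by_cases hr : r0 < 7
  · unfold pvSetCell pvCanvasOf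
    rw [PySem.List.getD_map_range _ _ _ _ hr, pvSet_map_range, pvSet_map_range]
    apply List.map_congr_left
    intro r hrm
    by_cases hrr : r = r0
    · subst hrr
      rw [if_pos rfl]
      apply List.map_congr_left
      intro k hk
      rcases eq_or_ne k i0 with hik | hik
      · simp [hik]
      · simp [hik, Ne.symm hik]
    · rw [if_neg hrr]
      apply List.map_congr_left
      intro k hk
      have : ¬ (r0 = r) := fun e => hrr e.symm
      simp [this]
  · have h1 : pvSetCell (pvCanvasOf N P) r0 i0 = pvCanvasOf N P := by
      unfold pvSetCell
      apply List.set_eq_of_length_le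
      simp [pvCanvasOf]; omega
    rw [h1]
    apply pvCanvasOf_congr
    intro r hr7 k hk
    have : ¬ (r0 = r) := by omega
    simp [this]

lemma pvFoldSet {α : Type} (ops : List α) (G : α → Prop) [DecidablePred G]
    (loc : α → Nat × Nat) (N : Nat) (P : Nat → Nat → Bool) :
    ops.foldl (fun cv a => if G a then pvSetCell cv (loc a).1 (loc a).2 else cv) (pvCanvasOf N P)
      = pvCanvasOf N (fun r k =>
          P r k || ops.any (fun a => decide (G a) && (decide ((loc a).1 = r) && decide ((loc a).2 = k)))) := by
  induction ops generalizing P with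
  | nil => simp
  | cons a l ih =>
    simp only [List.foldl_cons, List.any_cons]
    by_cases hG : G a
    · rw [if_pos hG, pvSetCell_canvasOf, ih]
      apply pvCanvasOf_congr
      intro r _ k _
      simp [hG, Bool.or_assoc, eq_comm]
    · rw [if_neg hG, ih]
      apply pvCanvasOf_congr
      intro r _ k _
      simp [hG]

lemma pvScan (spacing : Int) (cs : List Char) (w0 : Int) (acc : List (List String)) :
    cs.foldl (fun (st : Int × List (List String)) ch =>
        if FONT_5x7.contains (String.singleton ch) then
          (st.1 + 5 + spacing, st.2 ++ [FONT_5x7.getD (String.singleton ch) []])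
        else st) (w0, acc)
      = (w0 + (5 + spacing) * ((cs.filterMap (fun ch => FONT_5x7.get? (String.singleton ch))).length : Int),
         acc ++ cs.filterMap (fun ch => FONT_5x7.get? (String.singleton ch))) := by
  induction cs generalizing w0 acc with
  | nil => simp
  | cons c cs ih =>
    simp only [List.foldl_cons, List.filterMap_cons]
    cases h : FONT_5x7.get? (String.singleton c) with
    | none =>
      have hc : FONT_5x7.contains (String.singleton c) = false := by
        rw [PySem.Dict.contains_eq_isSome_get?, h]; rfl
      rw [if_neg (by simp [hc]), ih]
    | some g =>
      have hc : FONT_5x7.contains (String.singleton c) = true := by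
        rw [PySem.Dict.contains_eq_isSome_get?, h]; rfl
      have hg : FONT_5x7.getD (String.singleton c) [] = g := by
        rw [PySem.Dict.getD_eq_get?_getD, h]; rfl
      rw [if_pos (by simp [hc]), hg, ih]
      simp only [Prod.mk.injEq, List.length_cons]
      constructor
      · push_cast; ring
      · simp

def pvHit (cols : Int) (g : List String) (c : Int) (r k : Nat) : Bool :=
  (List.range 7).any (fun r0 => (List.range 5).any (fun x =>
    decide (PySem.Str.pyGet? (g.getD r0 "") (x : Int) = some '1' ∧
            0 ≤ c + (x : Int) ∧ c + (x : Int) < cols) &&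
    (decide (r0 = r) && decide ((c + (x : Int)).toNat = k))))

lemma pvPlot (cols : Int) (g : List String) (c : Int) (N : Nat) (P : Nat → Nat → Bool) :
    (List.range 7).foldl (fun cv (r : Nat) => (List.range 5).foldl (fun cv (x : Nat) =>
        if PySem.Str.pyGet? (g.getD r "") (x : Int) = some '1' ∧
            0 ≤ c + (x : Int) ∧ c + (x : Int) < cols then
          cv.set r ((cv.getD r []).set (c + (x : Int)).toNat 1)
        else cv) cv) (pvCanvasOf N P)
      = pvCanvasOf N (fun r k => P r k || pvHit cols g c r k) := by
  have h := pvFoldSet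
    (ops := (List.range 7).flatMap (fun r0 => (List.range 5).map (fun x => (r0, x))))
    (G := fun p : Nat × Nat => PySem.Str.pyGet? (g.getD p.1 "") (p.2 : Int) = some '1' ∧
            0 ≤ c + (p.2 : Int) ∧ c + (p.2 : Int) < cols)
    (loc := fun p : Nat × Nat => (p.1, (c + (p.2 : Int)).toNat)) N P
  rw [List.foldl_flatMap] at h
  simp only [List.foldl_map, pvSetCell] at h
  rw [h]
  apply pvCanvasOf_congr
  intro r _ k _
  simp [pvHit, List.any_flatMap, List.any_map, Function.comp_def, Bool.and_assoc]

lemma pvLoop (cols spacing : Int) (N : Nat) (c0 : Int) (L : List (List String)) :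
    ∀ (s : Int) (P : Nat → Nat → Bool),
    (L.foldl (fun (acc : List (List Int) × Int) glyph =>
       ((List.range 7).foldl (fun cv (r : Nat) =>
          (List.range 5).foldl (fun cv (x : Nat) =>
            if PySem.Str.pyGet? (glyph.getD r "") (x : Int) = some '1' ∧
                0 ≤ acc.2 + (x : Int) ∧ acc.2 + (x : Int) < cols then
              cv.set r ((cv.getD r []).set (acc.2 + (x : Int)).toNat 1)
            else cv) cv) acc.1,
        acc.2 + 5 + spacing)) (pvCanvasOf N P, c0 + s * (5 + spacing))).1
    = pvCanvasOf N (fun r k => P r k ||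
        (PySem.List.enumerate L s).any (fun jg => pvHit cols jg.2 (c0 + jg.1 * (5 + spacing)) r k)) := by
  induction L with
  | nil => intro s P; simp [PySem.List.enumerate_nil]
  | cons g L ih =>
    intro s P
    simp only [List.foldl_cons]
    rw [pvPlot]
    have hc : (c0 + s * (5 + spacing)) + 5 + spacing = c0 + (s + 1) * (5 + spacing) := by ring
    rw [hc, ih (s + 1) (fun r k => P r k || pvHit cols g (c0 + s * (5 + spacing)) r k)]
    apply pvCanvasOf_congr
    intro r _ k _
    rw [PySem.List.enumerate_cons]
    simp [Bool.or_assoc]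

-- ===== VERDICT (by name: the statement is the Claim_ definition above) =====
theorem compose_word_spec : Claim_equal_compose_word := by
  intro word tc spacing _
  unfold Spec_compose_word compose_word compose_word_alt
  simp only []
  rw [pvScan]
  dsimp only
  simp only [List.nil_append, zero_add]
  set L : List (List String) :=
    List.filterMap (fun ch => FONT_5x7.get? (String.singleton ch)) (PySem.Str.upper word).toList with hL
  have hw : (if L = [] then (5 + spacing) * (L.length : Int)
             else (5 + spacing) * (L.length : Int) - spacing)
      = (if L = [] then 0 else 5 * (L.length : Int) + spacing * ((L.length : Int) - 1)) := by
    rcases L with _ | ⟨g, L'⟩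
    · simp
    · rw [if_neg (by simp), if_neg (by simp)]
      ring
  rw [hw]
  set S : Int := max 0 (PySem.Int.floordiv (tc - if L = [] then 0 else 5 * (L.length : Int) + spacing * ((L.length : Int) - 1)) 2) with hS
  have hc0 : (List.range 7).map (fun _ => (PySem.List.pyRange 0 tc 1).map (fun _ => (0 : Int)))
      = pvCanvasOf tc.toNat (fun _ _ => false) := by
    simp [pvCanvasOf, PySem.List.pyRange_one, List.map_map, Function.comp_def]
  rw [hc0]
  have hA := pvLoop tc spacing tc.toNat S L 0 (fun _ _ => false)
  rw [show S + 0 * (5 + spacing) = S by ring] at hA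
  rw [hA]
  have hB : (List.range 7).map (fun (r : Nat) =>
      (PySem.List.pyRange 0 tc 1).map (fun c =>
        if (PySem.List.enumerate L 0).any (fun jg =>
              let x : Int := c - S - jg.1 * (5 + spacing)
              decide (0 ≤ x ∧ x < 5 ∧ PySem.Str.pyGet? (jg.2.getD r "") x = some '1'))
        then (1 : Int) else 0))
      = pvCanvasOf tc.toNat (fun r k =>
          (PySem.List.enumerate L 0).any (fun jg =>
            let x : Int := (k : Int) - S - jg.1 * (5 + spacing)
            decide (0 ≤ x ∧ x < 5 ∧ PySem.Str.pyGet? (jg.2.getD r "") x = some '1'))) := by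
    simp [pvCanvasOf, PySem.List.pyRange_one, List.map_map, Function.comp_def]
  rw [hB]
  apply pvCanvasOf_congr
  intro r hr k hk
  simp only [Bool.false_or]
  rw [Bool.eq_iff_iff]
  have htc : (k : Int) < tc := by
    have : (k : Int) < (tc.toNat : Int) := by exact_mod_cast hk
    omega
  simp only [List.any_eq_true, pvHit, Bool.and_eq_true, decide_eq_true_eq, List.mem_range]
  constructor
  · rintro ⟨jg, hjg, r0, hr0, x, hx, ⟨hbit, hge, hlt⟩, hr0r, hkx⟩
    subst hr0r
    refine ⟨jg, hjg, ?_⟩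
    have hkint : (k : Int) = (S + jg.1 * (5 + spacing)) + (x : Int) := by omega
    have hxeq : (k : Int) - S - jg.1 * (5 + spacing) = (x : Int) := by omega
    rw [hxeq]
    exact ⟨by positivity, by exact_mod_cast Nat.cast_lt.mpr hx, hbit⟩
  · rintro ⟨jg, hjg, hge, hlt, hbit⟩
    set c : Int := S + jg.1 * (5 + spacing) with hc
    have hx5 : ((k : Int) - S - jg.1 * (5 + spacing)).toNat < 5 := by omega
    refine ⟨jg, hjg, r, hr, ((k : Int) - S - jg.1 * (5 + spacing)).toNat, hx5, ?_, rfl, ?_⟩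
    · have hcast : ((((k : Int) - S - jg.1 * (5 + spacing)).toNat : Int)) = (k : Int) - S - jg.1 * (5 + spacing) := by omega
      rw [hcast]
      exact ⟨hbit, by omega, by omega⟩
    · have hcast : ((((k : Int) - S - jg.1 * (5 + spacing)).toNat : Int)) = (k : Int) - S - jg.1 * (5 + spacing) := by omega
      rw [hcast]
      omega
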